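-- pv_equiv track=rewrite | github.com/NeoOne601/Toori | cloud/runtime/world_model.py | _strip_caption_boilerplate
-- ===== SOURCE A (Python) =====
-- def normalize_token(raw: str) -> str:
--     return (
--         raw.lower()
--         .replace("_", " ")
--         .replace("-", " ")
--         .replace(",", " ")
--         .replace(".", " ")
--         .replace(";", " ")
--         .strip()
--     )
--
-- def _strip_caption_boilerplate(text: str) -> str:
--     normalized = normalize_token(text)
--     prefixes = (
--         "the image shows ",
--         "the image depicts ",
--         "the image appears to show ",
--         "this image shows ",
--         "this image depicts ",
--         "a scene of ",
--         "a photo of ",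
--         "a picture of ",
--         "overall the image shows ",
--     )
--     for prefix in prefixes:
--         if normalized.startswith(prefix):
--             normalized = normalized[len(prefix):]
--             break
--     for delimiter in (".", ";", " while ", " where ", " with ", " and "):
--         if delimiter in normalized:
--             normalized = normalized.split(delimiter, 1)[0]
--     return normalized.strip(" :-,")
-- ===== SOURCE B (Python) =====
-- _TABLE = {"_": " ", "-": " ", ",": " ", ".": " ", ";": " "}
--
-- _PREFIXES = (
--     "the image shows ",
--     "the image depicts ",
--     "the image appears to show ",
--     "this image shows ",
--     "this image depicts ",
--     "a scene of ",
--     "a photo of ",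
--     "a picture of ",
--     "overall the image shows ",
-- )
--
-- _DELIMS = (" while ", " where ", " with ", " and ")
--
--
-- def _cut(s, delims):
--     if not delims:
--         return s
--     i = s.find(delims[0])
--     return _cut(s if i < 0 else s[:i], delims[1:])
--
--
-- def _strip_caption_boilerplate(text: str) -> str:
--     # one-pass, table-driven normalization (lowercase + punctuation -> space), then trim
--     n = "".join(_TABLE.get(c, c) for c in text.lower()).strip()
--     hit = next((p for p in _PREFIXES if n.startswith(p)), None)
--     if hit is not None:
--         n = n[len(hit):]
--     # "." and ";" cannot survive normalization, so only the word delimiters matter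
--     return _cut(n, _DELIMS).strip(" :-,")
-- ===== Notes on version B (the rewrite author's own statement) =====
-- stated objective: alternative
-- what changed: Normalization becomes a single table-driven pass over the lowercased characters instead of five chained str.replace passes, the prefix loop becomes a first-match lookup (next over a generator), and the delimiter loop becomes a recursion over only the four effective delimiters that cuts unconditionally at str.find (the dead '.'/';' delimiters and the membership test disappear).
import Mathlib
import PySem

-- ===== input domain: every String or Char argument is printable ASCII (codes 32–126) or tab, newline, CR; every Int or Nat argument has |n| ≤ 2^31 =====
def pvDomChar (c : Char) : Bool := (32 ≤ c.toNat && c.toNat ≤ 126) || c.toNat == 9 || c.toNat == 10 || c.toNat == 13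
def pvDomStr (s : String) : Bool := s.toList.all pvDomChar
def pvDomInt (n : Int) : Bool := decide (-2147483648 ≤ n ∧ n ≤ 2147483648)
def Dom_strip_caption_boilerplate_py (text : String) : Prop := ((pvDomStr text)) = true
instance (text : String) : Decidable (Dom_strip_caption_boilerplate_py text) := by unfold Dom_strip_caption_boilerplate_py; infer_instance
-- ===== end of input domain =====

-- B replaces the five chained str.replace passes by one table-driven pass, the prefix loop by a
-- first-match lookup, and the six-delimiter membership-test loop by a recursion over the four
-- delimiters that can actually occur, cutting unconditionally at str.find (objective: alternative).

-- the prefix tuple, shared verbatim by both Python versions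
def pvPrefixes : List (List Char) :=
  ["the image shows ".toList, "the image depicts ".toList, "the image appears to show ".toList,
   "this image shows ".toList, "this image depicts ".toList, "a scene of ".toList,
   "a photo of ".toList, "a picture of ".toList, "overall the image shows ".toList]

-- ===== PORT A =====
-- normalize_token: lower, five chained replaces, strip
def pvNormTokA (s : List Char) : List Char :=
  PySem.Chars.strip
    (PySem.Chars.replace
      (PySem.Chars.replace
        (PySem.Chars.replace
          (PySem.Chars.replace
            (PySem.Chars.replace (PySem.Chars.lower s) ['_'] [' '])
            ['-'] [' '])
          [','] [' '])
        ['.'] [' '])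
      [';'] [' '])

-- the prefix for-loop with break
def pvStripPrefixA : List (List Char) → List Char → List Char
  | [], n => n
  | p :: ps, n =>
    if PySem.Chars.startswith n p then PySem.Chars.slice n (some (p.length : Int)) none
    else pvStripPrefixA ps n

-- the delimiter for-loop; the delimiters are nonempty literals, so split? = some (splitOnMax),
-- and inside the 'in' branch the split list is nonempty, so Python's [0] is exactly headD
def pvCutA : List (List Char) → List Char → List Char
  | [], n => n
  | d :: ds, n =>
    pvCutA ds (if PySem.Chars.isIn d n then (PySem.Chars.splitOnMax n d 1).headD [] else n)

def strip_caption_boilerplate_py (text : String) : String :=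
  String.ofList
    (PySem.Chars.stripChars
      (pvCutA [".".toList, ";".toList, " while ".toList, " where ".toList, " with ".toList, " and ".toList]
        (pvStripPrefixA pvPrefixes (pvNormTokA text.toList)))
      " :-,".toList)

-- ===== PORT B =====
-- the literal _TABLE dict
def pvTable : PySem.Dict Char Char := PySem.Dict.mk [('_', ' '), ('-', ' '), (',', ' '), ('.', ' '), (';', ' ')]

def pvMapChar (c : Char) : Char := PySem.Dict.getD pvTable c c

-- one-pass normalization: ''.join(_TABLE.get(c, c) for c in text.lower()).strip()
def pvNormTokB (s : List Char) : List Char :=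
  PySem.Chars.strip ((PySem.Chars.lower s).map pvMapChar)

-- _cut: recursion over the delimiters, slicing at find when it hits
def pvCutB : List Char → List (List Char) → List Char
  | s, [] => s
  | s, d :: ds =>
    pvCutB (if PySem.Chars.find s d < 0 then s
            else PySem.Chars.slice s none (some (PySem.Chars.find s d))) ds

def strip_caption_boilerplate_py_alt (text : String) : String :=
  let n := pvNormTokB text.toList
  let n2 := match pvPrefixes.find? (fun p => PySem.Chars.startswith n p) with
    | none => n
    | some p => PySem.Chars.slice n (some (p.length : Int)) none
  String.ofList
    (PySem.Chars.stripChars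
      (pvCutB n2 [" while ".toList, " where ".toList, " with ".toList, " and ".toList])
      " :-,".toList)

-- ===== PRECONDITION & SPEC =====
def Spec_strip_caption_boilerplate_py (text : String) (out : String) : Prop := out = strip_caption_boilerplate_py_alt text
instance (text : String) (out : String) : Decidable (Spec_strip_caption_boilerplate_py text out) := by unfold Spec_strip_caption_boilerplate_py; infer_instance

-- ===== CLAIM (what is proved, stated in full; the proofs are below) =====
def Claim_equal_strip_caption_boilerplate_py : Prop := ∀ (text : String), Dom_strip_caption_boilerplate_py text → Spec_strip_caption_boilerplate_py text (strip_caption_boilerplate_py text)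

-- ===== LEMMAS AND PROOFS =====

-- replace with single-character old/new is a map
theorem pv_replace_go_singleton (a b : Char) :
    ∀ (l : List Char) (fuel : Nat) (acc : List Char), l.length ≤ fuel →
      PySem.Chars.replace.go [a] [b] fuel l acc =
        acc.reverse ++ l.map (fun c => if c = a then b else c) := by
  intro l
  induction l with
  | nil => intro fuel acc _; cases fuel <;> simp [PySem.Chars.replace.go]
  | cons c t ih =>
    intro fuel acc hf
    cases fuel with
    | zero => simp at hf
    | succ m =>
      by_cases hca : c = a
      · subst hca
        have hp : [c].isPrefixOf (c :: t) = true := by simp [List.isPrefixOf]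
        simp only [PySem.Chars.replace.go, hp, if_pos]
        show PySem.Chars.replace.go [c] [b] m t (b :: acc) = _
        rw [ih m (b :: acc) (by simpa using hf)]
        simp
      · have hp : [a].isPrefixOf (c :: t) = false := by
          simp [List.isPrefixOf]; exact fun h => absurd h.symm hca
        simp only [PySem.Chars.replace.go, hp]
        rw [ih m (c :: acc) (by simpa using hf)]
        simp [hca]

theorem pv_replace_singleton (s : List Char) (a b : Char) :
    PySem.Chars.replace s [a] [b] = s.map (fun c => if c = a then b else c) := by
  have h := pv_replace_go_singleton a b s s.length [] (le_refl _)
  simpa [PySem.Chars.replace] using h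

-- the five chained single-character replaces pointwise equal the table lookup
theorem pv_chain_eq (c : Char) :
    (fun x => if x = ';' then ' ' else x)
      ((fun x => if x = '.' then ' ' else x)
        ((fun x => if x = ',' then ' ' else x)
          ((fun x => if x = '-' then ' ' else x)
            ((fun x => if x = '_' then ' ' else x) c)))) = pvMapChar c := by
  rcases eq_or_ne c '_' with h | h1
  · subst h; decide
  rcases eq_or_ne c '-' with h | h2
  · subst h; decide
  rcases eq_or_ne c ',' with h | h3
  · subst h; decide
  rcases eq_or_ne c '.' with h | h4
  · subst h; decide
  rcases eq_or_ne c ';' with h | h5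
  · subst h; decide
  have b1 : ('_' == c) = false := beq_eq_false_iff_ne.mpr (Ne.symm h1)
  have b2 : ('-' == c) = false := beq_eq_false_iff_ne.mpr (Ne.symm h2)
  have b3 : (',' == c) = false := beq_eq_false_iff_ne.mpr (Ne.symm h3)
  have b4 : ('.' == c) = false := beq_eq_false_iff_ne.mpr (Ne.symm h4)
  have b5 : (';' == c) = false := beq_eq_false_iff_ne.mpr (Ne.symm h5)
  simp [pvMapChar, pvTable, PySem.Dict.getD, PySem.Dict.get?, List.find?,
    b1, b2, b3, b4, b5, h1, h2, h3, h4, h5]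

-- normalization agrees
set_option maxHeartbeats 1000000 in
theorem pv_norm_eq (s : List Char) : pvNormTokA s = pvNormTokB s := by
  unfold pvNormTokA pvNormTokB
  rw [pv_replace_singleton, pv_replace_singleton, pv_replace_singleton,
      pv_replace_singleton, pv_replace_singleton]
  simp only [List.map_map]
  congr 1
  apply List.map_congr_left
  intro c _
  exact pv_chain_eq c

-- the table never outputs '.' or ';'
theorem pv_mapChar_ne (c : Char) : pvMapChar c ≠ '.' ∧ pvMapChar c ≠ ';' := by
  rcases eq_or_ne c '_' with h | h1
  · subst h; decide
  rcases eq_or_ne c '-' with h | h2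
  · subst h; decide
  rcases eq_or_ne c ',' with h | h3
  · subst h; decide
  rcases eq_or_ne c '.' with h | h4
  · subst h; decide
  rcases eq_or_ne c ';' with h | h5
  · subst h; decide
  have b1 : ('_' == c) = false := beq_eq_false_iff_ne.mpr (Ne.symm h1)
  have b2 : ('-' == c) = false := beq_eq_false_iff_ne.mpr (Ne.symm h2)
  have b3 : (',' == c) = false := beq_eq_false_iff_ne.mpr (Ne.symm h3)
  have b4 : ('.' == c) = false := beq_eq_false_iff_ne.mpr (Ne.symm h4)
  have b5 : (';' == c) = false := beq_eq_false_iff_ne.mpr (Ne.symm h5)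
  simp [pvMapChar, pvTable, PySem.Dict.getD, PySem.Dict.get?, List.find?,
    b1, b2, b3, b4, b5]
  exact ⟨h4, h5⟩

-- membership propagates through strip
theorem pv_mem_strip {c : Char} {s : List Char} (h : c ∈ PySem.Chars.strip s) : c ∈ s := by
  simp only [PySem.Chars.strip, PySem.Chars.rstrip, PySem.Chars.lstrip, List.mem_reverse] at h
  have h1 := (List.dropWhile_sublist (l := (List.dropWhile PySem.Chars.isspace s).reverse)
    (p := PySem.Chars.isspace)).mem h
  exact (List.dropWhile_sublist (l := s) (p := PySem.Chars.isspace)).mem (by simpa using h1)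

-- '.' and ';' do not occur after normalization and prefix stripping
theorem pv_no_dot (s : List Char) (ps : List (List Char)) (c : Char)
    (hc : c = '.' ∨ c = ';') : c ∉ pvStripPrefixA ps (pvNormTokB s) := by
  have hbase : c ∉ pvNormTokB s := by
    intro h
    unfold pvNormTokB at h
    have := pv_mem_strip h
    simp only [List.mem_map] at this
    obtain ⟨x, _, hx⟩ := this
    rcases hc with hc | hc <;> subst hc
    · exact (pv_mapChar_ne x).1 hx
    · exact (pv_mapChar_ne x).2 hx
  induction ps with
  | nil => exact hbase
  | cons p ps ih =>
    unfold pvStripPrefixA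
    split
    · intro h
      simp only [PySem.Chars.slice_eq_listSlice] at h
      rw [PySem.List.slice_from _ (Int.natCast_nonneg _)] at h
      exact hbase (List.mem_of_mem_drop h)
    · exact ih

-- the prefix for-loop with break is a first-match lookup
theorem pv_prefix_eq (ps : List (List Char)) (n : List Char) :
    pvStripPrefixA ps n =
      (match ps.find? (fun p => PySem.Chars.startswith n p) with
        | none => n
        | some p => PySem.Chars.slice n (some (p.length : Int)) none) := by
  induction ps with
  | nil => rfl
  | cons p ps ih =>
    unfold pvStripPrefixA
    by_cases h : PySem.Chars.startswith n p <;> simp [List.find?, h, ih]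

-- find.go shifts its accumulator
theorem pv_findgo_shift (d : List Char) (hd : d ≠ []) :
    ∀ (s : List Char) (j : Nat),
      PySem.Chars.find.go d s j =
        if PySem.Chars.find.go d s 0 < 0 then -1 else PySem.Chars.find.go d s 0 + j := by
  intro s
  induction s with
  | nil => intro j; simp [PySem.Chars.find.go, List.isEmpty_iff, hd]
  | cons c t ih =>
    intro j
    by_cases hp : d.isPrefixOf (c :: t)
    · simp [PySem.Chars.find.go, hp]
    · have hlb : -1 ≤ PySem.Chars.find.go d t 0 := by
        have := PySem.Chars.neg_one_le_find t d
        simpa [PySem.Chars.find] using this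
      simp only [PySem.Chars.find.go, hp, Bool.false_eq_true, ite_false]
      rw [ih (j + 1), ih 1]
      by_cases hneg : PySem.Chars.find.go d t 0 < 0
      · simp [hneg]
      · have h1 : ¬ PySem.Chars.find.go d t 0 + 1 < 0 := by omega
        simp only [hneg, ite_false]
        omega

-- a maxsplit budget of 0 copies the rest as one piece
theorem pv_splitgo_zero (d : List Char) :
    ∀ (fuel : Nat) (l : List Char) (acc : List (List Char)),
      PySem.Chars.splitOnMax.go d fuel 0 l [] acc = (l :: acc).reverse := by
  intro fuel l acc
  cases fuel <;> cases l <;> simp [PySem.Chars.splitOnMax.go]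

-- head of split(s, d, 1): the prefix before the first occurrence of d
theorem pv_splitgo_head (d : List Char) (hd : d ≠ []) :
    ∀ (s : List Char) (fuel : Nat) (cur : List Char), s.length < fuel →
      PySem.Chars.splitOnMax.go d fuel 1 s cur [] =
        (if 0 ≤ PySem.Chars.find s d then
          [cur.reverse ++ s.take (PySem.Chars.find s d).toNat,
            s.drop ((PySem.Chars.find s d).toNat + d.length)]
        else [cur.reverse ++ s]) := by
  intro s
  induction s with
  | nil =>
    intro fuel cur hf
    cases fuel with
    | zero => omega
    | succ m =>
      simp [PySem.Chars.splitOnMax.go, PySem.Chars.find, PySem.Chars.find.go,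
        List.isEmpty_iff, hd]
  | cons c t ih =>
    intro fuel cur hf
    cases fuel with
    | zero => omega
    | succ m =>
      by_cases hp : d.isPrefixOf (c :: t)
      · simp only [PySem.Chars.splitOnMax.go, hp, ite_true, one_ne_zero, ite_false]
        rw [pv_splitgo_zero]
        have hfind : PySem.Chars.find (c :: t) d = 0 := by
          simp [PySem.Chars.find, PySem.Chars.find.go, hp]
        simp [hfind]
      · have hrec : PySem.Chars.splitOnMax.go d (m + 1) 1 (c :: t) cur [] =
            PySem.Chars.splitOnMax.go d m 1 t (c :: cur) [] := by
          simp [PySem.Chars.splitOnMax.go, hp]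
        rw [hrec, ih m (c :: cur) (by simpa using hf)]
        have hfind : PySem.Chars.find (c :: t) d =
            if PySem.Chars.find t d < 0 then -1 else PySem.Chars.find t d + 1 := by
          simp only [PySem.Chars.find, PySem.Chars.find.go, hp, Bool.false_eq_true, ite_false]
          exact pv_findgo_shift d hd t 1
        by_cases hneg : PySem.Chars.find t d < 0
        · have : ¬ (0 : Int) ≤ -1 := by omega
          simp [hfind, hneg]
        · have h0 : 0 ≤ PySem.Chars.find t d := by omega
          have h1 : 0 ≤ PySem.Chars.find t d + 1 := by omega
          have htn : (PySem.Chars.find t d + 1).toNat = (PySem.Chars.find t d).toNat + 1 := by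
            omega
          simp only [hfind, hneg, ite_false, h0, h1, ite_true, htn]
          simp [List.take_succ_cons, List.drop_succ_cons, Nat.add_right_comm]

-- one delimiter step of the two cut loops agrees
theorem pv_cut_step (d n : List Char) (hd : d ≠ []) :
    (if PySem.Chars.isIn d n then (PySem.Chars.splitOnMax n d 1).headD [] else n) =
      (if PySem.Chars.find n d < 0 then n
        else PySem.Chars.slice n none (some (PySem.Chars.find n d))) := by
  by_cases h : PySem.Chars.isIn d n
  · have hfind : 0 ≤ PySem.Chars.find n d := by
      rw [PySem.Chars.find_nonneg_iff]
      exact (PySem.Chars.isIn_iff_infix d n).mp h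
    have hsplit : PySem.Chars.splitOnMax n d 1 =
        PySem.Chars.splitOnMax.go d (n.length + 1) 1 n [] [] := by
      simp [PySem.Chars.splitOnMax]
    rw [if_pos h, if_neg (by omega), hsplit,
      pv_splitgo_head d hd n (n.length + 1) [] (by omega), if_pos hfind]
    simp [PySem.Chars.slice_eq_listSlice, PySem.List.slice_to _ hfind]
  · have hfind : PySem.Chars.find n d = -1 := by
      rw [PySem.Chars.find_eq_neg_one_iff]
      exact (PySem.Chars.isIn_eq_false_iff d n).mp (by simpa using h)
    rw [if_neg h, if_pos (by rw [hfind]; omega)]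

-- a delimiter that does not occur is skipped by A's loop
theorem pv_cutA_cons_false (d n : List Char) (ds : List (List Char))
    (h : PySem.Chars.isIn d n = false) : pvCutA (d :: ds) n = pvCutA ds n := by
  simp [pvCutA, h]

-- the cut loops agree delimiter by delimiter
theorem pv_cut_eq (ds : List (List Char)) (n : List Char) (h : ∀ d ∈ ds, d ≠ []) :
    pvCutA ds n = pvCutB n ds := by
  induction ds generalizing n with
  | nil => rfl
  | cons d ds ih =>
    unfold pvCutA pvCutB
    rw [pv_cut_step d n (h d (by simp))]
    exact ih _ (fun d' hd' => h d' (by simp [hd']))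

theorem pv_isIn_false (c : Char) (n : List Char) (h : c ∉ n) :
    PySem.Chars.isIn [c] n = false := by
  rw [PySem.Chars.isIn_eq_false_iff, List.singleton_infix_iff]
  exact h

-- ===== VERDICT (by name: the statement is the Claim_ definition above) =====
theorem strip_caption_boilerplate_py_spec : Claim_equal_strip_caption_boilerplate_py := by
  unfold Claim_equal_strip_caption_boilerplate_py Spec_strip_caption_boilerplate_py
  intro text _
  unfold strip_caption_boilerplate_py strip_caption_boilerplate_py_alt
  rw [pv_norm_eq, pv_prefix_eq]
  set n2 := (match pvPrefixes.find? (fun p => PySem.Chars.startswith (pvNormTokB text.toList) p) with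
    | none => pvNormTokB text.toList
    | some p => PySem.Chars.slice (pvNormTokB text.toList) (some (p.length : Int)) none) with hn2
  have hno : ∀ c, c = '.' ∨ c = ';' → c ∉ n2 := by
    intro c hc
    rw [hn2, ← pv_prefix_eq]
    exact pv_no_dot text.toList pvPrefixes c hc
  have hdot : PySem.Chars.isIn ".".toList n2 = false := by
    have := pv_isIn_false '.' n2 (hno '.' (Or.inl rfl))
    simpa using this
  have hsemi : PySem.Chars.isIn ";".toList n2 = false := by
    have := pv_isIn_false ';' n2 (hno ';' (Or.inr rfl))
    simpa using this
  rw [pv_cutA_cons_false _ _ _ hdot, pv_cutA_cons_false _ _ _ hsemi,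
    pv_cut_eq _ _ (by
      intro d hd
      simp only [List.mem_cons, List.not_mem_nil, or_false] at hd
      rcases hd with h | h | h | h <;> subst h <;> decide)]
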